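-- pv_equiv track=rewrite | github.com/joaovictorsaraujo/Programacao-II | exercicios/exercícios_dicionários/libdict.py | cartesiano
-- ===== SOURCE A (Python) =====
-- def cartesiano(d): #13
--     lst = []
--     for k in d:
--         for l in d:
--             dic = {}
--             dic[k] = d[k]
--             if dic[k] == d[l]:
--                 continue
--             else:
--                 dic[l] = d[l]
--             if dic not in lst:
--                 lst.append(dic)
--     return lst
-- ===== SOURCE B (Python) =====
-- def cartesiano(d):
--     items = list(d.items())
--     return [{a: va, b: vb}
--             for i, (a, va) in enumerate(items)
--             for (b, vb) in items[i + 1:]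
--             if va != vb]
-- ===== Notes on version B (the rewrite author's own statement) =====
-- stated objective: faster
-- what changed: Generates each unordered key pair exactly once (i<j over the items) and keeps it when the values differ, instead of generating all ordered pairs and deduplicating each candidate dict with a linear membership scan over the result list.
import Mathlib
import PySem

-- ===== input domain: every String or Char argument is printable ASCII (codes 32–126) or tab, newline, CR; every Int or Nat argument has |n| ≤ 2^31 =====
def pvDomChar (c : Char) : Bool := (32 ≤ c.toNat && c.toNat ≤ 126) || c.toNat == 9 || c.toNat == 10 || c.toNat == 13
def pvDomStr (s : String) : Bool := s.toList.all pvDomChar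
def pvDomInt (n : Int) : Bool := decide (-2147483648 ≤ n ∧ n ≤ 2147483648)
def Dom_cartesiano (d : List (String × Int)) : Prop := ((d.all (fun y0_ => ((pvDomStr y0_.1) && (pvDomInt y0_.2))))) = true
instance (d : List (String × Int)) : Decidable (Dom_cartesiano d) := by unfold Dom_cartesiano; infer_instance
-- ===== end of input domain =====

-- B generates each unordered key pair once (i<j) instead of A's all-ordered-pairs-then-dedup membership scan; the return values are proved equal.

-- ===== PORT A =====
-- Python's `dic == e` on dicts ignores insertion order: equal sizes and every key of `a` maps to the same value in `b`.
def pyDictEq (a b : PySem.Dict String Int) : Bool :=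
  a.size == b.size && a.items.all (fun kv => b.get? kv.1 == some kv.2)

-- `for k in d` iterates the keys; `d[k]` is ported as getD with default 0, exact because k is always a key of dd.
def cartesiano (d : List (String × Int)) : List (List (String × Int)) :=
  let dd := PySem.Dict.ofList d
  let lst := dd.keys.foldl (fun lst k =>
    dd.keys.foldl (fun lst l =>
      let dic := PySem.Dict.empty.insert k (dd.getD k 0)
      if dic.getD k 0 == dd.getD l 0 then lst
      else
        let dic2 := dic.insert l (dd.getD l 0)
        if lst.any (fun e => pyDictEq e dic2) then lst else lst ++ [dic2]) lst)
    ([] : List (PySem.Dict String Int))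
  lst.map (fun e => e.items)

-- ===== PORT B =====
-- dict literal {a: va, b: vb}: a ≠ b always (two distinct keys of the same dict), so it is the two-entry list [(a,va),(b,vb)].
def cartesiano_alt (d : List (String × Int)) : List (List (String × Int)) :=
  let items := (PySem.Dict.ofList d).items
  (PySem.List.enumerate items).flatMap (fun ip =>
    ((PySem.List.slice items (some (ip.1 + 1)) none).filter (fun q => !(ip.2.2 == q.2))).map
      (fun q => [ip.2, q]))

-- ===== PRECONDITION & SPEC =====
def Spec_cartesiano (d : List (String × Int)) (out : List (List (String × Int))) : Prop := out = cartesiano_alt d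
instance (d : List (String × Int)) (out : List (List (String × Int))) : Decidable (Spec_cartesiano d out) := by unfold Spec_cartesiano; infer_instance

-- ===== CLAIM (what is proved, stated in full; the proofs are below) =====
def Claim_equal_cartesiano : Prop := ∀ (d : List (String × Int)), Dom_cartesiano d → Spec_cartesiano d (cartesiano d)

-- ===== LEMMAS AND PROOFS =====

-- The two-entry dict A builds for the ordered pair (p, q).
def pvDp (p q : String × Int) : PySem.Dict String Int :=
  (PySem.Dict.empty.insert p.1 p.2).insert q.1 q.2

-- A's inner-loop body, with both lookups already resolved to the pair components.
def pvStep (p : String × Int) (lst : List (PySem.Dict String Int)) (q : String × Int) :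
    List (PySem.Dict String Int) :=
  if p.2 == q.2 then lst
  else if lst.any (fun e => pyDictEq e (pvDp p q)) then lst else lst ++ [pvDp p q]

-- B's result, as structural recursion: head against its tail, then the tail.
def pvRecG (ps : List (String × Int)) : List (List (String × Int)) :=
  match ps with
  | [] => []
  | p :: t => ((t.filter (fun q => !(p.2 == q.2))).map (fun q => [p, q])) ++ pvRecG t

-- Dict-level analogue of pvRecG.
def pvGD (ps : List (String × Int)) : List (PySem.Dict String Int) :=
  match ps with
  | [] => []
  | p :: t => ((t.filter (fun q => !(p.2 == q.2))).map (pvDp p)) ++ pvGD t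

-- The dicts contributed by the processed prefix `pre`, when the remaining outer keys are `suf`.
def pvC (pre suf : List (String × Int)) : List (PySem.Dict String Int) :=
  match pre with
  | [] => []
  | a :: pre' => (((pre' ++ suf).filter (fun q => !(a.2 == q.2))).map (pvDp a)) ++ pvC pre' suf

theorem pvC_nil_left (suf : List (String × Int)) : pvC [] suf = [] := rfl

theorem pvC_cons (a : String × Int) (pre suf : List (String × Int)) :
    pvC (a :: pre) suf =
      (((pre ++ suf).filter (fun q => !(a.2 == q.2))).map (pvDp a)) ++ pvC pre suf := rfl

theorem pvC_nil (ps : List (String × Int)) : pvC ps [] = pvGD ps := by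
  induction ps with
  | nil => rfl
  | cons a t ih => simp [pvC_cons, pvGD, ih]

theorem pvC_snoc (pre : List (String × Int)) (p : String × Int) (suf : List (String × Int)) :
    pvC pre (p :: suf) ++ ((suf.filter (fun q => !(p.2 == q.2))).map (pvDp p)) =
      pvC (pre ++ [p]) suf := by
  induction pre with
  | nil => simp [pvC_cons, pvC_nil_left]
  | cons a pre ih => simp [pvC_cons, List.append_assoc, ih]

theorem items_pvDp (p q : String × Int) (h : p.1 ≠ q.1) : (pvDp p q).items = [p, q] := by
  have h1 : (PySem.Dict.empty.insert p.1 p.2).contains q.1 = false := by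
    simp [PySem.Dict.contains_insert, PySem.Dict.contains_empty, Ne.symm h]
  rw [pvDp, PySem.Dict.items_insert_of_not_contains _ _ h1,
    PySem.Dict.items_insert_of_not_contains _ _ (PySem.Dict.contains_empty _)]
  simp [show PySem.Dict.empty.items = ([] : List (String × Int)) from rfl]

theorem size_pvDp (p q : String × Int) (h : p.1 ≠ q.1) : (pvDp p q).size = 2 := by
  simp [PySem.Dict.size, items_pvDp p q h]

theorem get?_pvDp (k l : String × Int) (x : String) :
    (pvDp k l).get? x = if x = l.1 then some l.2 else if x = k.1 then some k.2 else none := by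
  rw [pvDp, PySem.Dict.get?_insert, PySem.Dict.get?_insert]
  simp [PySem.Dict.get?_empty]

theorem pyDictEq_pvDp_iff (a b k l : String × Int) (hab : a.1 ≠ b.1) (hkl : k.1 ≠ l.1) :
    pyDictEq (pvDp a b) (pvDp k l) = true ↔ ((a = k ∧ b = l) ∨ (a = l ∧ b = k)) := by
  rw [pyDictEq]
  simp only [items_pvDp a b hab, size_pvDp a b hab, size_pvDp k l hkl, List.all_cons,
    List.all_nil, get?_pvDp, Bool.and_true, Bool.and_eq_true, beq_iff_eq, beq_self_eq_true,
    true_and]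
  constructor
  · rintro ⟨ha, hb⟩
    split_ifs at ha hb <;> simp_all [Prod.ext_iff]
  · rintro (⟨rfl, rfl⟩ | ⟨rfl, rfl⟩) <;> constructor <;> split_ifs <;> simp_all

-- distinct positions in a key-nodup list carry distinct keys
theorem key_ne {ps α : List (String × Int)} {x : String × Int} {β : List (String × Int)}
    (h : (ps.map Prod.fst).Nodup) (hd : ps = α ++ x :: β) {y : String × Int} (hy : y ∈ β) :
    x.1 ≠ y.1 := by
  subst hd
  rw [List.map_append, List.nodup_append] at h
  have h2 := h.2.1
  rw [List.map_cons, List.nodup_cons] at h2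
  intro hxy
  exact h2.1 (hxy ▸ List.mem_map_of_mem hy)

theorem foldl_pvStep_skip (p : String × Int) :
    ∀ (qs L : List _), (∀ q ∈ qs, (p.2 == q.2) = false →
        ∃ e ∈ L, pyDictEq e (pvDp p q) = true) →
      qs.foldl (pvStep p) L = L := by
  intro qs
  induction qs with
  | nil => intro L _; rfl
  | cons q qs ih =>
    intro L h
    rw [List.foldl_cons]
    have hstep : pvStep p L q = L := by
      rw [pvStep]
      by_cases hv : (p.2 == q.2) = true
      · simp [hv]
      · have hany : (L.any (fun e => pyDictEq e (pvDp p q))) = true := by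
          rw [List.any_eq_true]
          obtain ⟨e, he, hq⟩ := h q (List.mem_cons_self ..) (by simpa using hv)
          exact ⟨e, he, hq⟩
        simp [hv, hany]
    rw [hstep]
    exact ih L (fun q' hq' hv => h q' (List.mem_cons_of_mem _ hq') hv)

theorem foldl_pvStep_fresh (p : String × Int) :
    ∀ (qs L : List _), (∀ q ∈ qs, ∀ e ∈ L, pyDictEq e (pvDp p q) = false) →
      (qs.map Prod.fst).Nodup → (∀ q ∈ qs, q.1 ≠ p.1) →
      qs.foldl (pvStep p) L = L ++ (qs.filter (fun q => !(p.2 == q.2))).map (pvDp p) := by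
  intro qs
  induction qs with
  | nil => intro L _ _ _; simp
  | cons q qs ih =>
    intro L hfresh hnd hp
    rw [List.foldl_cons]
    by_cases hv : (p.2 == q.2) = true
    · have hstep : pvStep p L q = L := by simp [pvStep, hv]
      rw [hstep, List.filter_cons_of_neg (by simp [hv])]
      exact ih L (fun q' h' => hfresh q' (List.mem_cons_of_mem _ h'))
        (by simpa using hnd.of_cons) (fun q' h' => hp q' (List.mem_cons_of_mem _ h'))
    · have hany : (L.any (fun e => pyDictEq e (pvDp p q))) = false := by
        rw [List.any_eq_false]
        intro e he
        simp [hfresh q (List.mem_cons_self ..) e he]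
      have hstep : pvStep p L q = L ++ [pvDp p q] := by simp [pvStep, hv, hany]
      rw [hstep, List.filter_cons_of_pos (by simp [hv]), List.map_cons]
      rw [ih (L ++ [pvDp p q]) ?_ (by simpa using hnd.of_cons)
        (fun q' h' => hp q' (List.mem_cons_of_mem _ h'))]
      · simp
      · intro q' hq' e he
        rcases List.mem_append.mp he with he | he
        · exact hfresh q' (List.mem_cons_of_mem _ hq') e he
        · have he' : e = pvDp p q := by simpa using he
          subst he'
          have hq1 : q.1 ≠ q'.1 := by
            rw [List.map_cons, List.nodup_cons] at hnd
            intro hx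
            exact hnd.1 (hx ▸ List.mem_map_of_mem hq')
          have hpq : p.1 ≠ q.1 := Ne.symm (hp q (List.mem_cons_self ..))
          have hpq' : p.1 ≠ q'.1 := Ne.symm (hp q' (List.mem_cons_of_mem _ hq'))
          rw [Bool.eq_false_iff]
          intro hE
          rcases (pyDictEq_pvDp_iff p q p q' hpq hpq').mp hE with ⟨-, h2⟩ | ⟨h1, -⟩
          · exact hq1 (by rw [h2])
          · exact hpq' (by rw [h1])

theorem mem_pvC_of {pre suf α β : List (String × Int)} {q r : String × Int}
    (hd : pre = α ++ q :: β) (hr : r ∈ β ++ suf) (hv : (q.2 == r.2) = false) :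
    pvDp q r ∈ pvC pre suf := by
  induction α generalizing pre with
  | nil =>
    subst hd
    rw [List.nil_append, pvC_cons]
    apply List.mem_append_left
    apply List.mem_map_of_mem
    rw [List.mem_filter]
    exact ⟨by simpa using hr, by simp [hv]⟩
  | cons a α ih =>
    subst hd
    rw [List.cons_append, pvC_cons]
    exact List.mem_append_right _ (ih rfl)

theorem of_mem_pvC {e : PySem.Dict String Int} :
    ∀ {pre suf : List (String × Int)}, e ∈ pvC pre suf →
      ∃ (α : List (String × Int)) (q : String × Int) (β : List (String × Int)) (r : String × Int),
        pre = α ++ q :: β ∧ r ∈ β ++ suf ∧ e = pvDp q r := by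
  intro pre
  induction pre with
  | nil => intro suf h; simp [pvC_nil_left] at h
  | cons a pre ih =>
    intro suf h
    rw [pvC_cons] at h
    rcases List.mem_append.mp h with h | h
    · obtain ⟨r, hr, he⟩ := List.mem_map.mp h
      exact ⟨[], a, pre, r, rfl, (List.mem_filter.mp hr).1, he.symm⟩
    · obtain ⟨α, q, β, r, h1, h2, h3⟩ := ih h
      exact ⟨a :: α, q, β, r, by rw [h1]; rfl, h2, h3⟩

theorem inner_total {ps pre suf : List (String × Int)} {p : String × Int}
    (hd : ps = pre ++ p :: suf) (hnd : (ps.map Prod.fst).Nodup) :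
    ps.foldl (pvStep p) (pvC pre (p :: suf)) =
      pvC pre (p :: suf) ++ (suf.filter (fun q => !(p.2 == q.2))).map (pvDp p) := by
  subst hd
  rw [List.foldl_append]
  -- phase 1: the keys before p are all already represented, nothing is appended
  rw [foldl_pvStep_skip p pre (pvC pre (p :: suf)) ?_]
  · -- phase 2: q = p is skipped (equal values)
    rw [List.foldl_cons]
    have hself : pvStep p (pvC pre (p :: suf)) p = pvC pre (p :: suf) := by
      simp [pvStep]
    rw [hself]
    -- phase 3: every pair (p, q) with q ∈ suf is fresh
    apply foldl_pvStep_fresh p suf _ ?_ ?_ ?_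
    · intro q hq e he
      obtain ⟨α, a, β, r, h1, h2, h3⟩ := of_mem_pvC he
      subst h3
      have hps : pre ++ p :: suf = α ++ a :: (β ++ p :: suf) := by rw [h1]; simp
      have har : a.1 ≠ r.1 := key_ne hnd hps h2
      have hpq : p.1 ≠ q.1 := key_ne (α := pre) hnd rfl hq
      have hap : a.1 ≠ p.1 := key_ne hnd hps (by simp)
      have haq : a.1 ≠ q.1 := key_ne hnd hps (by simp [hq])
      rw [Bool.eq_false_iff]
      intro hE
      rcases (pyDictEq_pvDp_iff a r p q har hpq).mp hE with ⟨h1', -⟩ | ⟨h1', -⟩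
      · exact hap (by rw [h1'])
      · exact haq (by rw [h1'])
    · have h' := hnd
      rw [List.map_append, List.nodup_append] at h'
      have h2 := h'.2.1
      rw [List.map_cons, List.nodup_cons] at h2
      exact h2.2
    · intro q hq
      exact Ne.symm (key_ne (α := pre) hnd rfl hq)
  · intro q hq hv
    obtain ⟨α, β, hqd⟩ := List.append_of_mem hq
    refine ⟨pvDp q p, mem_pvC_of (suf := p :: suf) hqd (by simp) (by simpa [BEq.comm] using hv), ?_⟩
    have hps : pre ++ p :: suf = α ++ q :: (β ++ p :: suf) := by rw [hqd]; simp
    have hqp : q.1 ≠ p.1 := key_ne hnd hps (by simp)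
    have hpq : p.1 ≠ q.1 := Ne.symm hqp
    exact (pyDictEq_pvDp_iff q p p q hqp hpq).mpr (Or.inr ⟨rfl, rfl⟩)

theorem outer_fold {ps : List (String × Int)} (hnd : (ps.map Prod.fst).Nodup) :
    ∀ (suf pre : List (String × Int)), ps = pre ++ suf →
      suf.foldl (fun lst p => ps.foldl (pvStep p) lst) (pvC pre suf) = pvC ps [] := by
  intro suf
  induction suf with
  | nil =>
    intro pre h
    have hp : pre = ps := by simpa using h.symm
    subst hp
    rfl
  | cons p suf ih =>
    intro suf_pre h
    rw [List.foldl_cons, inner_total h hnd, pvC_snoc]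
    exact ih (suf_pre ++ [p]) (by rw [h]; simp)

theorem map_items_pvGD {ps : List (String × Int)} (hnd : (ps.map Prod.fst).Nodup) :
    (pvGD ps).map (fun e => e.items) = pvRecG ps := by
  induction ps with
  | nil => rfl
  | cons p t ih =>
    rw [pvGD, pvRecG, List.map_append, List.map_map,
      ih (by rw [List.map_cons, List.nodup_cons] at hnd; exact hnd.2)]
    congr 1
    apply List.map_congr_left
    intro q hq
    exact items_pvDp p q (key_ne (α := []) hnd rfl (List.mem_of_mem_filter hq))

-- A's fold over the keys, with the lookups resolved, is the abstract fold over the items.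
theorem cartesiano_eq_abstract (d : List (String × Int)) :
    cartesiano d =
      (((PySem.Dict.ofList d).items.foldl
        (fun lst p => (PySem.Dict.ofList d).items.foldl (pvStep p) lst) []).map
          (fun e => e.items)) := by
  simp only [cartesiano]
  have hkeys : (PySem.Dict.ofList d).keys = (PySem.Dict.ofList d).items.map Prod.fst := rfl
  have hndk : (PySem.Dict.ofList d).keys.Nodup := PySem.Dict.nodup_keys_ofList d
  apply congrArg
  rw [hkeys, List.foldl_map]
  apply PySem.List.foldl_congr_mem
  intro acc p hp
  rw [List.foldl_map]
  apply PySem.List.foldl_congr_mem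
  intro acc' q hq
  obtain ⟨k, v⟩ := p
  obtain ⟨k', v'⟩ := q
  have h1 := PySem.Dict.getD_of_mem_items _ hp hndk 0
  have h2 := PySem.Dict.getD_of_mem_items _ hq hndk 0
  rw [PySem.Dict.getD_insert_self, h1, h2]
  rfl

theorem cartesiano_alt_eq_recG (d : List (String × Int)) :
    cartesiano_alt d = pvRecG (PySem.Dict.ofList d).items := by
  simp only [cartesiano_alt]
  have main : ∀ (xs pre : List (String × Int)),
      (PySem.List.enumerate xs (pre.length : Int)).flatMap (fun ip =>
        ((PySem.List.slice (pre ++ xs) (some (ip.1 + 1)) none).filter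
          (fun q => !(ip.2.2 == q.2))).map (fun q => [ip.2, q])) = pvRecG xs := by
    intro xs
    induction xs with
    | nil => intro pre; simp [PySem.List.enumerate_nil, pvRecG]
    | cons p t ih =>
      intro pre
      rw [PySem.List.enumerate_cons, List.flatMap_cons]
      have hc : (pre.length : Int) + 1 = ((pre ++ [p]).length : Int) := by simp
      have hsl : PySem.List.slice (pre ++ p :: t) (some ((pre.length : Int) + 1)) none = t := by
        rw [hc, PySem.List.slice_from_natCast]
        rw [show pre ++ p :: t = (pre ++ [p]) ++ t by simp, List.drop_left]
      rw [hsl, pvRecG]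
      congr 1
      rw [hc, show pre ++ p :: t = (pre ++ [p]) ++ t by simp]
      exact ih (pre ++ [p])
  have h0 : (PySem.List.enumerate (PySem.Dict.ofList d).items 0) =
      (PySem.List.enumerate (PySem.Dict.ofList d).items
        ((([] : List (String × Int)).length : Int))) := rfl
  rw [h0, show (PySem.Dict.ofList d).items =
    ([] : List (String × Int)) ++ (PySem.Dict.ofList d).items from rfl]
  exact main (PySem.Dict.ofList d).items []

-- ===== VERDICT (by name: the statement is the Claim_ definition above) =====
theorem cartesiano_spec : Claim_equal_cartesiano := by
  intro d _
  rw [Spec_cartesiano, cartesiano_eq_abstract, cartesiano_alt_eq_recG]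
  have hnd : ((PySem.Dict.ofList d).items.map Prod.fst).Nodup :=
    PySem.Dict.nodup_keys_ofList d
  have h := outer_fold hnd (PySem.Dict.ofList d).items [] rfl
  rw [pvC_nil_left] at h
  rw [h, pvC_nil]
  exact map_items_pvGD hnd
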